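-- pv_equiv track=rewrite | github.com/iceout/phoneloc | phoneloc/locid_map.py | filter_by_weight
-- ===== SOURCE A (Python) =====
-- def filter_by_weight(pairs):
--     seen = set()
--     top_w = pairs[0][0]
--     for w, t in pairs:
--         if (t,) in seen:
--             continue
--         seen.add((t,))
--         if w == top_w:
--             yield w, t
-- ===== SOURCE B (Python) =====
-- def filter_by_weight(pairs):
--     top_w = pairs[0][0]
--     for i, (w, t) in enumerate(pairs):
--         if w == top_w and all(t != u for _, u in pairs[:i]):
--             yield w, t
-- ===== Notes on version B (the rewrite author's own statement) =====
-- stated objective: alternative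
-- what changed: A maintains a mutable seen-set while yielding; B keeps no state at all: for each indexed pair it decides first-occurrence by scanning the prefix pairs[:i] directly, trading A's O(n) set for an O(n^2) stateless prefix scan.
import Mathlib
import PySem

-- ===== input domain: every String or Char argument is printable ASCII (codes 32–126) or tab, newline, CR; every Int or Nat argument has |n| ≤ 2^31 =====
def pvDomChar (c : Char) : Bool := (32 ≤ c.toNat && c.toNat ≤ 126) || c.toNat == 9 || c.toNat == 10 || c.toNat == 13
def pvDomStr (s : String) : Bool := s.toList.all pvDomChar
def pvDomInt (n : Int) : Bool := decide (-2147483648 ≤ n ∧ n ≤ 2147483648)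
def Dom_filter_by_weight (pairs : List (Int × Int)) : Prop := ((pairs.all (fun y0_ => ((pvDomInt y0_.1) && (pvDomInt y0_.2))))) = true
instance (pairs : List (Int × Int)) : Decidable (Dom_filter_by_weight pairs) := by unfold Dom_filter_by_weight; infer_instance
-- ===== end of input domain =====

-- B replaces A's mutable seen-set with a stateless quadratic check: a pair at index i
-- is emitted iff its weight is the first weight and its tag occurs nowhere in pairs[:i].

-- ===== PORT A =====
def filter_by_weight (pairs : List (Int × Int)) : List (Int × Int) :=
  match pairs with
  | [] => []  -- unreachable under Pre_: Python raises IndexError on pairs[0][0]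
  | (w0, _) :: _ =>
    (pairs.foldl
      (fun (st : PySem.Set Int × List (Int × Int)) p =>
        if PySem.Set.contains st.1 p.2 then st
        else (PySem.Set.add st.1 p.2,
              if p.1 = w0 then st.2 ++ [(p.1, p.2)] else st.2))
      (PySem.Set.empty, [])).2

-- ===== PORT B =====
def filter_by_weight_alt (pairs : List (Int × Int)) : List (Int × Int) :=
  match pairs with
  | [] => []  -- unreachable under Pre_: Python raises IndexError on pairs[0][0]
  | (w0, _) :: _ =>
    (PySem.List.enumerate pairs).foldl
      (fun out e =>
        if e.2.1 = w0 ∧ (PySem.List.slice pairs none (some e.1)).all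
            (fun q => decide (e.2.2 ≠ q.2))
        then out ++ [(e.2.1, e.2.2)] else out) []

-- ===== PRECONDITION & SPEC =====
-- Pre_ excludes only the empty list, on which Python A raises IndexError (pairs[0][0]).
def Pre_filter_by_weight (pairs : List (Int × Int)) : Prop := pairs ≠ []
instance (pairs : List (Int × Int)) : Decidable (Pre_filter_by_weight pairs) := by
  unfold Pre_filter_by_weight; infer_instance
def pvWitness_filter_by_weight : (List (Int × Int)) := [(1, 2), (1, 3), (0, 2)]

def Spec_filter_by_weight (pairs : List (Int × Int)) (out : List (Int × Int)) : Prop := out = filter_by_weight_alt pairs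
instance (pairs : List (Int × Int)) (out : List (Int × Int)) : Decidable (Spec_filter_by_weight pairs out) := by unfold Spec_filter_by_weight; infer_instance

-- ===== CLAIM (what is proved, stated in full; the proofs are below) =====
def Claim_equal_filter_by_weight : Prop := ∀ (pairs : List (Int × Int)), Dom_filter_by_weight pairs → Pre_filter_by_weight pairs → Spec_filter_by_weight pairs (filter_by_weight pairs)

-- ===== LEMMAS AND PROOFS =====

-- common specification: first occurrences (by second component) not yet in `seen`, in order
def firstOcc : List (Int × Int) → List Int → List (Int × Int)
  | [], _ => []
  | (w, t) :: rest, seen =>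
    if PySem.Set.contains seen t then firstOcc rest seen
    else (w, t) :: firstOcc rest (seen ++ [t])

theorem loopA_eq (w0 : Int) (pairs : List (Int × Int)) :
    ∀ (seen : PySem.Set Int) (acc : List (Int × Int)),
    (pairs.foldl
      (fun (st : PySem.Set Int × List (Int × Int)) p =>
        if PySem.Set.contains st.1 p.2 then st
        else (PySem.Set.add st.1 p.2,
              if p.1 = w0 then st.2 ++ [(p.1, p.2)] else st.2))
      (seen, acc)).2
    = acc ++ (firstOcc pairs seen).filter (fun p => p.1 = w0) := by
  induction pairs with
  | nil => intro seen acc; simp [firstOcc]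
  | cons p rest ih =>
    intro seen acc
    obtain ⟨w, t⟩ := p
    rw [List.foldl_cons]
    by_cases h : PySem.Set.contains seen t = true
    · rw [if_pos h]
      unfold firstOcc
      rw [if_pos h]
      exact ih seen acc
    · have hadd : PySem.Set.add seen t = seen ++ [t] := by
        unfold PySem.Set.add
        rw [if_neg h]
      rw [if_neg h]
      unfold firstOcc
      rw [if_neg h]
      by_cases hw : w = w0
      · simp only [hadd, ih, List.filter_cons, hw]
        simp
      · simp only [if_neg hw, hadd, ih, List.filter_cons]
        simp [hw]

theorem loopB_eq (w0 : Int) (pairs : List (Int × Int)) :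
    ∀ (l pre : List (Int × Int)) (seen : PySem.Set Int) (acc : List (Int × Int)),
    pairs = pre ++ l →
    (∀ x : Int, PySem.Set.contains seen x = decide (x ∈ pre.map Prod.snd)) →
    (PySem.List.enumerate l (pre.length : Int)).foldl
      (fun out e =>
        if e.2.1 = w0 ∧ (PySem.List.slice pairs none (some e.1)).all
            (fun q => decide (e.2.2 ≠ q.2))
        then out ++ [(e.2.1, e.2.2)] else out) acc
    = acc ++ (firstOcc l seen).filter (fun p => p.1 = w0) := by
  intro l
  induction l with
  | nil => intro pre seen acc _ _; simp [PySem.List.enumerate_nil, firstOcc]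
  | cons p rest ih =>
    intro pre seen acc hsplit hseen
    obtain ⟨w, t⟩ := p
    rw [PySem.List.enumerate_cons, List.foldl_cons]
    have hslice : PySem.List.slice pairs none (some (pre.length : Int)) = pre := by
      rw [PySem.List.slice_to_natCast, hsplit, List.take_left]
    have hall : (pre.all (fun q => decide (t ≠ q.2)))
        = ! PySem.Set.contains seen t := by
      rw [hseen t]
      by_cases hm : t ∈ pre.map Prod.snd
      · obtain ⟨q, hq, hqt⟩ := List.mem_map.mp hm
        simp only [hm, decide_true, Bool.not_true]
        exact List.all_eq_false.mpr ⟨q, hq, by simp [hqt]⟩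
      · simp only [hm, decide_false, Bool.not_false]
        refine List.all_eq_true.mpr ?_
        intro q hq
        simp only [decide_eq_true_eq]
        exact fun h => hm (List.mem_map.mpr ⟨q, hq, h.symm⟩)
    have hseen' : ∀ x : Int, PySem.Set.contains (seen ++ [t]) x
        = decide (x ∈ (pre ++ [(w, t)]).map Prod.snd) := by
      intro x
      by_cases hx : x = t
      · subst hx; simp [PySem.Set.contains]
      · have hx' := hseen x
        simp only [PySem.Set.contains, List.contains_eq_mem, decide_eq_decide] at hx'
        simp [hx, hx']
    have hpre' : pairs = (pre ++ [(w, t)]) ++ rest := by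
      rw [hsplit]; simp
    have hlen' : ((pre.length : Int) + 1) = (((pre ++ [(w, t)]).length : Int)) := by
      simp
    by_cases h : PySem.Set.contains seen t = true
    · -- duplicate tag: both sides skip it
      have hcond : ¬ (w = w0 ∧ (PySem.List.slice pairs none (some (pre.length : Int))).all
          (fun q => decide (t ≠ q.2)) = true) := by
        rw [hslice, hall, h]; simp
      rw [if_neg hcond]
      unfold firstOcc
      rw [if_pos h, hlen', ih (pre ++ [(w, t)]) seen acc hpre'
        (by intro x
            by_cases hx : x = t
            · subst hx
              rw [show PySem.Set.contains seen x = true from h]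
              simp
            · rw [hseen x]; simp [hx])]
    · have hns : PySem.Set.contains seen t = false := by simpa using h
      unfold firstOcc
      rw [if_neg h, hlen']
      by_cases hw : w = w0
      · have hcond : (w = w0 ∧ (PySem.List.slice pairs none (some (pre.length : Int))).all
            (fun q => decide (t ≠ q.2)) = true) := by
          rw [hslice, hall, hns]; simp [hw]
        rw [if_pos hcond, ih (pre ++ [(w, t)]) (seen ++ [t]) (acc ++ [(w, t)]) hpre' hseen']
        simp [hw]
      · have hcond : ¬ (w = w0 ∧ (PySem.List.slice pairs none (some (pre.length : Int))).all
            (fun q => decide (t ≠ q.2)) = true) := by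
          intro hc; exact hw hc.1
        rw [if_neg hcond, ih (pre ++ [(w, t)]) (seen ++ [t]) acc hpre' hseen']
        simp [hw]

-- ===== VERDICT (by name: the statement is the Claim_ definition above) =====
theorem filter_by_weight_spec : Claim_equal_filter_by_weight := by
  intro pairs _ hpre
  unfold Spec_filter_by_weight
  match pairs with
  | [] => exact absurd rfl hpre
  | (w0, t0) :: rest =>
    show (((w0, t0) :: rest).foldl
        (fun (st : PySem.Set Int × List (Int × Int)) p =>
          if PySem.Set.contains st.1 p.2 then st
          else (PySem.Set.add st.1 p.2,
                if p.1 = w0 then st.2 ++ [(p.1, p.2)] else st.2))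
        (PySem.Set.empty, [])).2
      = (PySem.List.enumerate ((w0, t0) :: rest)).foldl
          (fun out e =>
            if e.2.1 = w0 ∧ (PySem.List.slice ((w0, t0) :: rest) none (some e.1)).all
                (fun q => decide (e.2.2 ≠ q.2))
            then out ++ [(e.2.1, e.2.2)] else out) []
    rw [loopA_eq w0 ((w0, t0) :: rest) PySem.Set.empty []]
    have h0 : (0 : Int) = (((([] : List (Int × Int))).length : Int)) := by simp
    rw [show PySem.List.enumerate ((w0, t0) :: rest) (0 : Int)
        = PySem.List.enumerate ((w0, t0) :: rest) ((([] : List (Int × Int)).length : Int)) by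
      rw [← h0]]
    rw [loopB_eq w0 ((w0, t0) :: rest) ((w0, t0) :: rest) [] PySem.Set.empty []
      (by simp) (by intro x; simp [PySem.Set.contains, PySem.Set.empty])]
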